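-- pv_equiv track=rewrite | github.com/abdelneuhaus/SFPA | get_idx_laser_fov_for_each_well.py | get_idx_laser_fov_for_each_well
-- ===== SOURCE A (Python) =====
-- def get_idx_laser_fov_for_each_well(index, laser, file_path, fov=None):
--     """
--         Get index, laser and optional FOV for each well (used to name PDF save)
--     """
--     for l in laser:
--         for i in index:
--             if fov !=None:
--                 for f in fov:
--                     if (i in file_path) and (l in file_path) and (f in file_path):
--                         return[i, l, f]
--             elif (i in file_path) and (l in file_path):
--                 return[i, l]
-- ===== SOURCE B (Python) =====
-- def get_idx_laser_fov_for_each_well(index, laser, file_path, fov=None):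
--     """
--         Get index, laser and optional FOV for each well (used to name PDF save)
--     """
--     def first_in(xs):
--         for x in xs:
--             if x in file_path:
--                 return x
--         return None
--
--     i = first_in(index)
--     l = first_in(laser)
--     if i is None or l is None:
--         return None
--     if fov is None:
--         return [i, l]
--     f = first_in(fov)
--     if f is None:
--         return None
--     return [i, l, f]
-- ===== Notes on version B (the rewrite author's own statement) =====
-- stated objective: faster
-- what changed: Instead of three nested loops re-testing every (laser,index,fov) combination, B scans each list once for its first element contained in file_path and combines the three results, exploiting that the membership tests are independent.
import Mathlib
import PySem

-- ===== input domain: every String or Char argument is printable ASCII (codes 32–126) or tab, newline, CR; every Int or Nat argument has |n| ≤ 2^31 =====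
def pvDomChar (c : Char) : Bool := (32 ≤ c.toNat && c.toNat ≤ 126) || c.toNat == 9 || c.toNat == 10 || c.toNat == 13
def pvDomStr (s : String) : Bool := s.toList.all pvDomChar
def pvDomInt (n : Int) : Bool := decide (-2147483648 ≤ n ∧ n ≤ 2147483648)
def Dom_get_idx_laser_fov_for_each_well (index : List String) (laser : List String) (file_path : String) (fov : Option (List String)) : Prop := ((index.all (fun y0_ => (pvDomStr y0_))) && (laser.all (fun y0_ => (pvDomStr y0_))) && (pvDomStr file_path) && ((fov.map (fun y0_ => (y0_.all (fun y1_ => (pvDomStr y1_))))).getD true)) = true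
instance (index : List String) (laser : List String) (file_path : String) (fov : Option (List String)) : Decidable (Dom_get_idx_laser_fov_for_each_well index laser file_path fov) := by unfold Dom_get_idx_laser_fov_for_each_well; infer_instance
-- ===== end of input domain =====

-- B replaces A's three nested loops by one independent first-present scan per list (asymptotically faster).
-- ===== PORT A =====
-- inner 'for f in fov' loop
def pvGoF (path i l : String) : List String → Option (List String)
  | [] => none
  | f :: rest =>
    if PySem.Str.isIn i path && PySem.Str.isIn l path && PySem.Str.isIn f path then some [i, l, f]
    else pvGoF path i l rest

-- middle 'for i in index' loop (with the fov != None branch)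
def pvGoI (path l : String) (fov : Option (List String)) : List String → Option (List String)
  | [] => none
  | i :: rest =>
    match fov with
    | some fs => (pvGoF path i l fs).orElse (fun _ => pvGoI path l fov rest)
    | none =>
      if PySem.Str.isIn i path && PySem.Str.isIn l path then some [i, l]
      else pvGoI path l fov rest

-- outer 'for l in laser' loop
def pvGoL (path : String) (index : List String) (fov : Option (List String)) : List String → Option (List String)
  | [] => none
  | l :: rest => (pvGoI path l fov index).orElse (fun _ => pvGoL path index fov rest)

def get_idx_laser_fov_for_each_well (index : List String) (laser : List String) (file_path : String) (fov : Option (List String)) : Option (List String) :=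
  pvGoL file_path index fov laser

-- ===== PORT B =====
-- first_in: first element of xs that is a substring of path
def pvFirstIn (path : String) : List String → Option String
  | [] => none
  | x :: rest => if PySem.Str.isIn x path then some x else pvFirstIn path rest

def get_idx_laser_fov_for_each_well_alt (index : List String) (laser : List String) (file_path : String) (fov : Option (List String)) : Option (List String) :=
  match pvFirstIn file_path index, pvFirstIn file_path laser with
  | some i, some l =>
    match fov with
    | none => some [i, l]
    | some fs =>
      match pvFirstIn file_path fs with
      | some f => some [i, l, f]
      | none => none
  | _, _ => none

-- ===== PRECONDITION & SPEC =====
def Spec_get_idx_laser_fov_for_each_well (index : List String) (laser : List String) (file_path : String) (fov : Option (List String)) (out : Option (List String)) : Prop := out = get_idx_laser_fov_for_each_well_alt index laser file_path fov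
instance (index : List String) (laser : List String) (file_path : String) (fov : Option (List String)) (out : Option (List String)) : Decidable (Spec_get_idx_laser_fov_for_each_well index laser file_path fov out) := by unfold Spec_get_idx_laser_fov_for_each_well; infer_instance

-- ===== CLAIM (what is proved, stated in full; the proofs are below) =====
def Claim_equal_get_idx_laser_fov_for_each_well : Prop := ∀ (index : List String) (laser : List String) (file_path : String) (fov : Option (List String)), Dom_get_idx_laser_fov_for_each_well index laser file_path fov → Spec_get_idx_laser_fov_for_each_well index laser file_path fov (get_idx_laser_fov_for_each_well index laser file_path fov)

-- ===== LEMMAS AND PROOFS =====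
theorem pvGoF_eq (path i l : String) (fs : List String) :
    pvGoF path i l fs =
      if PySem.Str.isIn i path && PySem.Str.isIn l path then
        (pvFirstIn path fs).map (fun f => [i, l, f]) else none := by
  induction fs with
  | nil => simp [pvGoF, pvFirstIn]
  | cons f rest ih =>
    simp only [pvGoF, pvFirstIn, ih]
    by_cases hi : PySem.Chars.isIn i.toList path.toList = true <;> by_cases hl : PySem.Chars.isIn l.toList path.toList = true <;>
      by_cases hf : PySem.Chars.isIn f.toList path.toList = true <;> simp [hi, hl, hf]

theorem pvGoI_some (path l : String) (fs index : List String) :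
    pvGoI path l (some fs) index =
      if PySem.Str.isIn l path then
        (pvFirstIn path index).bind (fun i => (pvFirstIn path fs).map (fun f => [i, l, f]))
      else none := by
  induction index with
  | nil => simp [pvGoI, pvFirstIn]
  | cons i rest ih =>
    simp only [pvGoI, pvGoF_eq, ih]
    by_cases hi : PySem.Chars.isIn i.toList path.toList = true <;> by_cases hl : PySem.Chars.isIn l.toList path.toList = true <;>
      cases hf : pvFirstIn path fs <;> simp [pvFirstIn, hi, hl, Option.orElse]

theorem pvGoI_none (path l : String) (index : List String) :
    pvGoI path l none index =
      if PySem.Str.isIn l path then (pvFirstIn path index).map (fun i => [i, l]) else none := by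
  induction index with
  | nil => simp [pvGoI, pvFirstIn]
  | cons i rest ih =>
    simp only [pvGoI, ih]
    by_cases hi : PySem.Chars.isIn i.toList path.toList = true <;> by_cases hl : PySem.Chars.isIn l.toList path.toList = true <;>
      simp [pvFirstIn, hi, hl]

theorem pvGoL_eq (path : String) (index : List String) (fov : Option (List String))
    (laser : List String) :
    pvGoL path index fov laser = get_idx_laser_fov_for_each_well_alt index laser path fov := by
  induction laser with
  | nil =>
    cases hi : pvFirstIn path index <;>
      simp [pvGoL, get_idx_laser_fov_for_each_well_alt, pvFirstIn, hi]
  | cons l rest ih =>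
    by_cases hl : PySem.Chars.isIn l.toList path.toList = true
    · cases fov with
      | none =>
        cases hi : pvFirstIn path index <;>
          simp [pvGoL, pvGoI_none, ih, get_idx_laser_fov_for_each_well_alt, pvFirstIn, hl, hi,
            Option.orElse]
      | some fs =>
        cases hi : pvFirstIn path index <;> cases hf : pvFirstIn path fs <;>
          simp [pvGoL, pvGoI_some, ih, get_idx_laser_fov_for_each_well_alt, pvFirstIn, hl, hi, hf,
            Option.orElse] <;> cases pvFirstIn path rest <;> rfl
    · cases fov <;>
        simp [pvGoL, pvGoI_none, pvGoI_some, hl, ih, get_idx_laser_fov_for_each_well_alt,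
          pvFirstIn, Option.orElse]

-- ===== VERDICT (by name: the statement is the Claim_ definition above) =====
theorem get_idx_laser_fov_for_each_well_spec : Claim_equal_get_idx_laser_fov_for_each_well := by
  intro index laser file_path fov _
  unfold Spec_get_idx_laser_fov_for_each_well get_idx_laser_fov_for_each_well
  exact pvGoL_eq file_path index fov laser
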